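-- pv_equiv track=rewrite | github.com/GitMonsters/octotetrahedral-agi | arc-puzzle-catalog/re-arc/solves/12687fe0/solver.py | transform
-- ===== SOURCE A (Python) =====
-- from collections import Counter
--
-- def transform(grid):
--     R, C = len(grid), len(grid[0])
--     bg = Counter(v for row in grid for v in row).most_common(1)[0][0]
--
--     bg_cols = [c for c in range(C) if all(grid[r][c] == bg for r in range(R))]
--     bg_rows = [r for r in range(R) if all(grid[r][c] == bg for c in range(C))]
--
--     sep_cols = [-1] + bg_cols + [C]
--     sep_rows = [-1] + bg_rows + [R]
--     bands_c = [(sep_cols[i]+1, sep_cols[i+1]) for i in range(len(sep_cols)-1)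
--                if sep_cols[i+1] > sep_cols[i]+1]
--     bands_r = [(sep_rows[i]+1, sep_rows[i+1]) for i in range(len(sep_rows)-1)
--                if sep_rows[i+1] > sep_rows[i]+1]
--
--     out = []
--     for rs, re in bands_r:
--         row = []
--         for cs, ce in bands_c:
--             vals = [grid[r][c] for r in range(rs, re) for c in range(cs, ce)]
--             row.append(Counter(vals).most_common(1)[0][0])
--         out.append(row)
--     return out
-- ===== SOURCE B (Python) =====
-- from collections import Counter
--
-- def transform(grid):
--     C = len(grid[0])
--     cnt = Counter()
--     for row in grid:
--         for v in row:
--             cnt[v] += 1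
--     bg = cnt.most_common(1)[0][0]
--
--     row_sep = [all(v == bg for v in row[:C]) for row in grid]
--     col_sep = [all(row[c] == bg for row in grid) for c in range(C)]
--
--     def runs(seps):
--         bands, start = [], None
--         for i, s in enumerate(seps):
--             if s:
--                 if start is not None:
--                     bands.append((start, i))
--                     start = None
--             else:
--                 if start is None:
--                     start = i
--         if start is not None:
--             bands.append((start, len(seps)))
--         return bands
--
--     bands_r, bands_c = runs(row_sep), runs(col_sep)
--
--     counters = [[Counter() for _ in bands_c] for _ in bands_r]
--     for r, row in enumerate(grid):
--         i = next((k for k, (s, e) in enumerate(bands_r) if s <= r < e), None)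
--         if i is None:
--             continue
--         for c, v in enumerate(row):
--             j = next((k for k, (s, e) in enumerate(bands_c) if s <= c < e), None)
--             if j is None:
--                 continue
--             counters[i][j][v] += 1
--
--     return [[cell.most_common(1)[0][0] for cell in row] for row in counters]
-- ===== Notes on version B (the rewrite author's own statement) =====
-- stated objective: alternative
-- what changed: A finds separator rows/columns by full-grid index scans, builds bands from a padded separator list, and re-extracts and re-counts a fresh value list for every (row-band, col-band) pair; B computes per-row/per-column all-background flags, groups them into bands by run-length scanning of the flag lists, and fills a 2-D grid of counters in one enumerate pass over the grid, reading one majority per counter.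
import Mathlib
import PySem

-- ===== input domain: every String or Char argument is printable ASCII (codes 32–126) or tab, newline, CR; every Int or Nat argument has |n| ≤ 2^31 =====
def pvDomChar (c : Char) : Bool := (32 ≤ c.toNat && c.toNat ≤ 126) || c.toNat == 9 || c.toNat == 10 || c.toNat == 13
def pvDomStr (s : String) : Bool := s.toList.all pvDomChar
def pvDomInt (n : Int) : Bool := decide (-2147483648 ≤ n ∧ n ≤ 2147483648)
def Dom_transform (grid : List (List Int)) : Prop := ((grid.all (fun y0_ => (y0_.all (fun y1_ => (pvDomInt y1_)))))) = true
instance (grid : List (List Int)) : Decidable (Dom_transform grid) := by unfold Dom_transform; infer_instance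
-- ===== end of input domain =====

-- B replaces A's separator-index scans, padded separator lists and per-band value re-extraction by
-- per-row/per-column all-background flags, run-length grouping of those flags into bands, and a single
-- enumerate pass filling a 2-D grid of counters (objective: alternative).

-- Counter(xs).most_common(1)[0][0]: the first key, in insertion order, whose count is maximal
-- (heapq.nlargest is stable); used by both ports.
def mostCommon1 (d : PySem.Dict Int Int) : Int :=
  match d.items with
  | [] => 0
  | p :: rest => (rest.foldl (fun best q => if best.2 < q.2 then q else best) p).1

-- ===== PORT A =====
-- grid[r][c]; every access made by A is in range under Pre_transform
def cellAt (grid : List (List Int)) (r c : Int) : Int :=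
  PySem.List.pyGetD (PySem.List.pyGetD grid r []) c 0

def transform (grid : List (List Int)) : List (List Int) :=
  let R : Int := grid.length
  let C : Int := (grid.headD []).length
  let bg := mostCommon1 (PySem.Dict.counter (grid.flatMap (fun row => row)))
  let bgCols := (PySem.List.pyRange 0 C 1).filter (fun c =>
      (PySem.List.pyRange 0 R 1).all (fun r => cellAt grid r c == bg))
  let bgRows := (PySem.List.pyRange 0 R 1).filter (fun r =>
      (PySem.List.pyRange 0 C 1).all (fun c => cellAt grid r c == bg))
  let sepCols : List Int := [-1] ++ bgCols ++ [C]
  let sepRows : List Int := [-1] ++ bgRows ++ [R]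
  let bandsC := (List.range (sepCols.length - 1)).filterMap (fun i =>
      if sepCols.getD (i+1) 0 > sepCols.getD i 0 + 1 then
        some (sepCols.getD i 0 + 1, sepCols.getD (i+1) 0) else none)
  let bandsR := (List.range (sepRows.length - 1)).filterMap (fun i =>
      if sepRows.getD (i+1) 0 > sepRows.getD i 0 + 1 then
        some (sepRows.getD i 0 + 1, sepRows.getD (i+1) 0) else none)
  bandsR.map (fun rb =>
    bandsC.map (fun cb =>
      mostCommon1 (PySem.Dict.counter
        ((PySem.List.pyRange rb.1 rb.2 1).flatMap (fun r =>
          (PySem.List.pyRange cb.1 cb.2 1).map (fun c => cellAt grid r c))))))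

-- ===== PORT B =====
-- run-length grouping: maximal blocks of consecutive False flags, as (start, end) index pairs
def runs (seps : List Bool) : List (Int × Int) :=
  let st := (PySem.List.enumerate seps 0).foldl
    (fun (acc : List (Int × Int) × Option Int) p =>
      if p.2 then
        match acc.2 with
        | some s => (acc.1 ++ [(s, p.1)], none)
        | none => acc
      else
        match acc.2 with
        | none => (acc.1, some p.1)
        | some _ => acc) ([], none)
  match st.2 with
  | some s => st.1 ++ [(s, (seps.length : Int))]
  | none => st.1

-- next((k for k, (s, e) in enumerate(bands) if s <= x < e), None)
def bandIndex (bands : List (Int × Int)) (x : Int) : Option Nat :=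
  bands.findIdx? (fun p => decide (p.1 ≤ x) && decide (x < p.2))

def transform_alt (grid : List (List Int)) : List (List Int) :=
  let C : Int := (grid.headD []).length
  let cnt := grid.foldl (fun d row =>
      row.foldl (fun d v => d.modify v 0 (· + 1)) d) (PySem.Dict.empty : PySem.Dict Int Int)
  let bg := mostCommon1 cnt
  let rowSep := grid.map (fun row =>
      (PySem.List.slice row none (some C)).all (fun v => v == bg))
  let colSep := (PySem.List.pyRange 0 C 1).map (fun c =>
      grid.all (fun row => PySem.List.pyGetD row c 0 == bg))
  let bandsR := runs rowSep
  let bandsC := runs colSep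
  let counters := (PySem.List.enumerate grid 0).foldl (fun st p =>
      match bandIndex bandsR p.1 with
      | none => st
      | some i => (PySem.List.enumerate p.2 0).foldl (fun st q =>
          match bandIndex bandsC q.1 with
          | none => st
          | some j => st.modify i (fun rowL =>
              rowL.modify j (fun d => d.modify q.2 0 (· + 1)))) st)
      (bandsR.map (fun _ => bandsC.map (fun _ => (PySem.Dict.empty : PySem.Dict Int Int))))
  counters.map (fun row => row.map mostCommon1)

-- ===== PRECONDITION & SPEC =====
-- Exactly where Python A returns: nonempty grid, at least one value, and no row shorter than the
-- first row (otherwise A raises IndexError on grid[0], on most_common of an empty Counter, or on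
-- a missing grid[r][c]).
def Pre_transform (grid : List (List Int)) : Prop :=
  grid ≠ [] ∧ grid.flatten ≠ [] ∧ ∀ row ∈ grid, (grid.headD []).length ≤ row.length
instance (grid : List (List Int)) : Decidable (Pre_transform grid) := by unfold Pre_transform; infer_instance
def pvWitness_transform : List (List Int) := [[1, 0, 2], [0, 0, 0], [3, 0, 3]]
def Spec_transform (grid : List (List Int)) (out : List (List Int)) : Prop := out = transform_alt grid
instance (grid : List (List Int)) (out : List (List Int)) : Decidable (Spec_transform grid out) := by unfold Spec_transform; infer_instance

-- ===== CLAIM =====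
def Claim_equal_transform : Prop := ∀ (grid : List (List Int)), Dom_transform grid → Pre_transform grid → Spec_transform grid (transform grid)

-- ===== LEMMAS AND PROOFS =====

def upd2 (st : List (List (PySem.Dict Int Int))) (i j : Nat) (v : Int) : List (List (PySem.Dict Int Int)) :=
  st.modify i (fun rowL => rowL.modify j (fun d => d.modify v 0 (· + 1)))

def get2 (st : List (List (PySem.Dict Int Int))) (i j : Nat) : Option (PySem.Dict Int Int) :=
  st[i]?.bind (fun row => row[j]?)

def bandsOf (s : List Int) : List (Int × Int) :=
  match s with
  | a :: b :: t => (if b > a + 1 then [(a + 1, b)] else []) ++ bandsOf (b :: t)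
  | _ => []

theorem bands_eq_bandsOf (s : List Int) :
    (List.range (s.length - 1)).filterMap (fun i =>
      if s.getD (i+1) 0 > s.getD i 0 + 1 then
        some (s.getD i 0 + 1, s.getD (i+1) 0) else none) = bandsOf s := by
  induction s with
  | nil => simp [bandsOf]
  | cons a t ih =>
    cases t with
    | nil => simp [bandsOf]
    | cons b u =>
      have hlen : (a :: b :: u).length - 1 = ((b :: u).length - 1) + 1 := by
        simp [List.length_cons]
      rw [hlen, List.range_succ_eq_map, List.filterMap_cons, List.filterMap_map]
      by_cases h : b > a + 1 <;>
        simp only [List.getD, bandsOf, h, if_pos] <;>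
        simp only [Function.comp] <;>
        rw [← ih] <;> simp [h]

theorem bandsOf_mem (s : List Int) (hs : s.Pairwise (· < ·)) (p : Int × Int) (hp : p ∈ bandsOf s) :
    p.1 < p.2 ∧ (∀ h, s.head? = some h → h < p.1) ∧ p.2 ∈ s ∧ ∃ a ∈ s, a + 1 = p.1 := by
  induction s with
  | nil => simp [bandsOf] at hp
  | cons a t ih =>
    cases t with
    | nil => simp [bandsOf] at hp
    | cons b u =>
      have hs' : (b :: u).Pairwise (· < ·) := hs.of_cons
      have hab : a < b := (List.pairwise_cons.mp hs).1 b (by simp)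
      simp only [bandsOf, List.mem_append] at hp
      rcases hp with hp | hp
      · by_cases h : b > a + 1
        · simp [h] at hp
          subst hp
          refine ⟨by simpa using h, ?_, by simp, ⟨a, by simp, rfl⟩⟩
          intro h' hh; simp at hh; omega
        · simp [h] at hp
      · obtain ⟨h1, h2, h3, a', ha', ha2⟩ := ih hs' hp
        have hb : b < p.1 := h2 b rfl
        refine ⟨h1, ?_, by simp [List.mem_cons] at h3 ⊢; tauto, ⟨a', by simp [List.mem_cons] at ha' ⊢; tauto, ha2⟩⟩
        intro h' hh; simp at hh; omega

theorem bandsOf_pairwise (s : List Int) (hs : s.Pairwise (· < ·)) :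
    (bandsOf s).Pairwise (fun p q => p.2 ≤ q.1) := by
  induction s with
  | nil => simp [bandsOf]
  | cons a t ih =>
    cases t with
    | nil => simp [bandsOf]
    | cons b u =>
      have hs' : (b :: u).Pairwise (· < ·) := hs.of_cons
      have hrest := ih hs'
      simp only [bandsOf]
      rw [List.pairwise_append]
      refine ⟨?_, hrest, ?_⟩
      · split <;> simp
      · intro x hx q hq
        have := bandsOf_mem (b :: u) hs' q hq
        have hb : b < q.1 := this.2.1 b rfl
        by_cases h : b > a + 1 <;> simp [h] at hx
        subst hx; simpa using le_of_lt hb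

theorem bandIndex_eq_some_iff (bands : List (Int × Int))
    (hpw : bands.Pairwise (fun p q => p.2 ≤ q.1))
    (i : Nat) (x y : Int) (hget : bands[i]? = some (x, y)) (r : Int) :
    bandIndex bands r = some i ↔ x ≤ r ∧ r < y := by
  have hi : i < bands.length := by
    rcases List.getElem?_eq_some_iff.mp hget with ⟨h, _⟩; exact h
  have hxy : bands[i] = (x, y) := (List.getElem?_eq_some_iff.mp hget).2
  constructor
  · intro h
    rcases (List.findIdx?_eq_some_iff_getElem).mp h with ⟨h1, h2, _⟩
    rw [hxy] at h2; simpa using h2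
  · intro ⟨h1, h2⟩
    apply (List.findIdx?_eq_some_iff_getElem).mpr
    refine ⟨hi, by rw [hxy]; simpa using ⟨h1, h2⟩, ?_⟩
    intro j hj
    have hle : bands[j].2 ≤ bands[i].1 :=
      (List.pairwise_iff_getElem.mp hpw) j i (by omega) hi hj
    rw [hxy] at hle
    simp only [Bool.and_eq_true, decide_eq_true_eq, not_and]
    intro _; omega

theorem filter_pyRange_band (n x y : Int) (h0 : 0 ≤ x) (hxy : x ≤ y) (hyn : y ≤ n) :
    (PySem.List.pyRange 0 n 1).filter (fun r => decide (x ≤ r) && decide (r < y))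
      = PySem.List.pyRange x y 1 := by
  rw [PySem.List.pyRange_one_append 0 x n h0 (le_trans hxy hyn),
      PySem.List.pyRange_one_append x y n hxy hyn]
  rw [List.filter_append, List.filter_append]
  have h1 : (PySem.List.pyRange 0 x 1).filter (fun r => decide (x ≤ r) && decide (r < y)) = [] := by
    rw [List.filter_eq_nil_iff]
    intro a ha
    have := PySem.List.mem_pyRange_one.mp ha
    simp only [Bool.and_eq_true, decide_eq_true_eq, not_and]; omega
  have h2 : (PySem.List.pyRange x y 1).filter (fun r => decide (x ≤ r) && decide (r < y)) = PySem.List.pyRange x y 1 := by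
    rw [List.filter_eq_self]
    intro a ha
    have := PySem.List.mem_pyRange_one.mp ha
    simp only [Bool.and_eq_true, decide_eq_true_eq]; omega
  have h3 : (PySem.List.pyRange y n 1).filter (fun r => decide (x ≤ r) && decide (r < y)) = [] := by
    rw [List.filter_eq_nil_iff]
    intro a ha
    have := PySem.List.mem_pyRange_one.mp ha
    simp only [Bool.and_eq_true, decide_eq_true_eq, not_and]; omega
  rw [h1, h2, h3]; simp

theorem get2_upd2 (st : List (List (PySem.Dict Int Int))) (a b i j : Nat) (v : Int) :
    get2 (upd2 st a b v) i j =
      if a = i ∧ b = j then (get2 st i j).map (fun d => d.modify v 0 (· + 1)) else get2 st i j := by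
  unfold get2 upd2
  rw [List.getElem?_modify]
  cases h : st[i]? with
  | none => split <;> simp
  | some row =>
    simp only [Option.map_eq_map, Option.map_some, Option.bind_some]
    by_cases hai : a = i
    · subst hai
      simp only [true_and, if_true]
      rw [List.getElem?_modify]
      cases h2 : row[j]? with
      | none => split <;> simp
      | some d =>
        by_cases hbj : b = j
        · subst hbj; simp
        · simp [hbj]
    · simp [hai]

theorem get2_foldl (L : List (Int × Int)) (bi bj : Int → Option Nat) (f : Int → Int → Int)
    (st : List (List (PySem.Dict Int Int))) (i j : Nat) :
    get2 (L.foldl (fun st p =>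
        match bi p.1, bj p.2 with
        | some a, some b => upd2 st a b (f p.1 p.2)
        | _, _ => st) st) i j
    = (get2 st i j).map (fun d =>
        (L.filterMap (fun p =>
          match bi p.1, bj p.2 with
          | some a, some b => if a = i ∧ b = j then some (f p.1 p.2) else none
          | _, _ => none)).foldl (fun d v => d.modify v 0 (· + 1)) d) := by
  induction L generalizing st with
  | nil => cases h : get2 st i j <;> simp [h]
  | cons p L ih =>
    rw [List.foldl_cons, List.filterMap_cons]
    cases hb1 : bi p.1 with
    | none => rw [ih]
    | some a =>
      cases hb2 : bj p.2 with
      | none => rw [ih]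
      | some b =>
        simp only []
        rw [ih, get2_upd2]
        by_cases hab : a = i ∧ b = j
        · rw [if_pos hab, if_pos hab]
          cases h : get2 st i j <;> simp
        · rw [if_neg hab, if_neg hab]

theorem row_step_eq (cols : List Int) (bo : Option Nat) (bj : Int → Option Nat) (g : Int → Int)
    (init : List (List (PySem.Dict Int Int))) :
    (match bo with
     | none => init
     | some i => cols.foldl (fun st c =>
         match bj c with
         | none => st
         | some j => upd2 st i j (g c)) init)
    = cols.foldl (fun st c =>
        match bo, bj c with
        | some a, some b => upd2 st a b (g c)
        | _, _ => st) init := by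
  cases bo with
  | none => exact (PySem.List.foldl_ignore cols init).symm
  | some i =>
    apply PySem.List.foldl_congr_mem
    intro st c _
    cases bj c <;> rfl

theorem nested_eq_flat (rows cols : List Int) (bi bj : Int → Option Nat) (f : Int → Int → Int)
    (init : List (List (PySem.Dict Int Int))) :
    rows.foldl (fun st r =>
      match bi r with
      | none => st
      | some i => cols.foldl (fun st c =>
          match bj c with
          | none => st
          | some j => upd2 st i j (f r c)) st) init
    = (rows.flatMap (fun r => cols.map (fun c => (r, c)))).foldl
        (fun st p =>
          match bi p.1, bj p.2 with
          | some a, some b => upd2 st a b (f p.1 p.2)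
          | _, _ => st) init := by
  induction rows generalizing init with
  | nil => simp
  | cons r rows ih =>
    rw [List.flatMap_cons, List.foldl_append, List.foldl_cons, List.foldl_map, ih]
    congr 1
    exact row_step_eq cols (bi r) bj (fun c => f r c) init

theorem filterMap_dite_eq_map_filter {α β : Type} (l : List α) (P : α → Prop) [DecidablePred P] (g : α → β) :
    l.filterMap (fun x => if P x then some (g x) else none) = (l.filter (fun x => decide (P x))).map g := by
  induction l with
  | nil => rfl
  | cons x l ih =>
    rw [List.filterMap_cons, List.filter_cons]
    by_cases h : P x <;> simp [h, ih]

theorem flatMap_dite_eq_filter_flatMap {α β : Type} (l : List α) (P : α → Prop) [DecidablePred P] (g : α → List β) :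
    l.flatMap (fun r => if P r then g r else []) = (l.filter (fun r => decide (P r))).flatMap g := by
  induction l with
  | nil => rfl
  | cons x l ih =>
    rw [List.flatMap_cons, List.filter_cons]
    by_cases h : P x <;> simp [h, ih]

theorem sel_eq (bi bj : Int → Option Nat) (i j : Nat) (f : Int → Int → Int) (p : Int × Int) :
    (match bi p.1, bj p.2 with
     | some a, some b => if a = i ∧ b = j then some (f p.1 p.2) else none
     | _, _ => none)
    = if bi p.1 = some i then (if bj p.2 = some j then some (f p.1 p.2) else none) else none := by
  cases hb1 : bi p.1 with
  | none => simp
  | some a =>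
    cases hb2 : bj p.2 with
    | none => simp
    | some b =>
      simp only [Option.some.injEq]
      by_cases ha : a = i <;> by_cases hb : b = j <;> simp [ha, hb]

theorem shape_foldl (L : List (Int × Int)) (bi bj : Int → Option Nat) (f : Int → Int → Int)
    (st : List (List (PySem.Dict Int Int))) :
    (L.foldl (fun st p =>
        match bi p.1, bj p.2 with
        | some a, some b => upd2 st a b (f p.1 p.2)
        | _, _ => st) st).length = st.length ∧
    ∀ i : Nat, ((L.foldl (fun st p =>
        match bi p.1, bj p.2 with
        | some a, some b => upd2 st a b (f p.1 p.2)
        | _, _ => st) st)[i]?).map List.length = (st[i]?).map List.length := by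
  induction L generalizing st with
  | nil => exact ⟨rfl, fun _ => rfl⟩
  | cons p L ih =>
    rw [List.foldl_cons]
    have key : ∀ (st' : List (List (PySem.Dict Int Int))),
        (match bi p.1, bj p.2 with
         | some a, some b => upd2 st' a b (f p.1 p.2)
         | _, _ => st').length = st'.length ∧
        ∀ i : Nat, ((match bi p.1, bj p.2 with
         | some a, some b => upd2 st' a b (f p.1 p.2)
         | _, _ => st')[i]?).map List.length = (st'[i]?).map List.length := by
      intro st'
      cases bi p.1 with
      | none => exact ⟨rfl, fun _ => rfl⟩
      | some a =>
        cases bj p.2 with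
        | none => exact ⟨rfl, fun _ => rfl⟩
        | some b =>
          constructor
          · simp [upd2]
          · intro i
            simp only [upd2]
            rw [List.getElem?_modify]
            by_cases hai : a = i <;> cases h : st'[i]? <;> simp [hai]
    obtain ⟨k1, k2⟩ := key st
    obtain ⟨i1, i2⟩ := ih (st := (match bi p.1, bj p.2 with
         | some a, some b => upd2 st a b (f p.1 p.2)
         | _, _ => st))
    exact ⟨by rw [i1, k1], fun i => by rw [i2 i, k2 i]⟩

theorem core (grid : List (List Int)) (R C : Int) (bandsR bandsC : List (Int × Int))
    (hpwR : bandsR.Pairwise (fun p q => p.2 ≤ q.1))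
    (hpwC : bandsC.Pairwise (fun p q => p.2 ≤ q.1))
    (hbR : ∀ p ∈ bandsR, 0 ≤ p.1 ∧ p.1 ≤ p.2 ∧ p.2 ≤ R)
    (hbC : ∀ p ∈ bandsC, 0 ≤ p.1 ∧ p.1 ≤ p.2 ∧ p.2 ≤ C) :
    bandsR.map (fun rb =>
      bandsC.map (fun cb =>
        mostCommon1 (PySem.Dict.counter
          ((PySem.List.pyRange rb.1 rb.2 1).flatMap (fun r =>
            (PySem.List.pyRange cb.1 cb.2 1).map (fun c => cellAt grid r c))))))
    = ((PySem.List.pyRange 0 R 1).foldl (fun st r =>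
        match bandIndex bandsR r with
        | none => st
        | some i => (PySem.List.pyRange 0 C 1).foldl (fun st c =>
            match bandIndex bandsC c with
            | none => st
            | some j => upd2 st i j (cellAt grid r c)) st)
        (bandsR.map (fun _ => bandsC.map (fun _ => (PySem.Dict.empty : PySem.Dict Int Int))))).map
        (fun row => row.map mostCommon1) := by
  rw [nested_eq_flat]
  have hfilt : ∀ (i j : Nat), i < bandsR.length → j < bandsC.length →
      ((PySem.List.pyRange 0 R 1).flatMap (fun r =>
        (PySem.List.pyRange 0 C 1).map (fun c => (r, c)))).filterMap (fun p =>
          match bandIndex bandsR p.1, bandIndex bandsC p.2 with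
          | some a, some b => if a = i ∧ b = j then some (cellAt grid p.1 p.2) else none
          | _, _ => none)
      = (PySem.List.pyRange (bandsR[i]!).1 (bandsR[i]!).2 1).flatMap (fun r =>
          (PySem.List.pyRange (bandsC[j]!).1 (bandsC[j]!).2 1).map (fun c => cellAt grid r c)) := by
    intro i j hi hj
    have hRi : bandsR[i]? = some (bandsR[i]!) := by
      simp [List.getElem!_eq_getElem?_getD, List.getElem?_eq_getElem hi]
    have hCj : bandsC[j]? = some (bandsC[j]!) := by
      simp [List.getElem!_eq_getElem?_getD, List.getElem?_eq_getElem hj]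
    have hRmem : bandsR[i]! ∈ bandsR := by
      rw [List.getElem!_eq_getElem?_getD, List.getElem?_eq_getElem hi]; exact List.getElem_mem hi
    have hCmem : bandsC[j]! ∈ bandsC := by
      rw [List.getElem!_eq_getElem?_getD, List.getElem?_eq_getElem hj]; exact List.getElem_mem hj
    have hRiff := bandIndex_eq_some_iff bandsR hpwR i (bandsR[i]!).1 (bandsR[i]!).2 (by rw [hRi])
    have hCiff := bandIndex_eq_some_iff bandsC hpwC j (bandsC[j]!).1 (bandsC[j]!).2 (by rw [hCj])
    simp only [sel_eq]
    rw [List.filterMap_flatMap]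
    have hinner : ∀ r : Int,
        ((PySem.List.pyRange 0 C 1).map (fun c => (r, c))).filterMap (fun p =>
          if bandIndex bandsR p.1 = some i then
            (if bandIndex bandsC p.2 = some j then some (cellAt grid p.1 p.2) else none) else none)
        = if bandIndex bandsR r = some i then
            (PySem.List.pyRange 0 C 1).filterMap (fun c =>
              if bandIndex bandsC c = some j then some (cellAt grid r c) else none) else [] := by
      intro r
      rw [List.filterMap_map]
      by_cases hr : bandIndex bandsR r = some i
      · simp [Function.comp, hr]
      · simp [Function.comp, hr]
    have hfun : (fun r => ((PySem.List.pyRange 0 C 1).map (fun c => (r, c))).filterMap (fun p =>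
          if bandIndex bandsR p.1 = some i then
            (if bandIndex bandsC p.2 = some j then some (cellAt grid p.1 p.2) else none) else none))
        = (fun r => if bandIndex bandsR r = some i then
            (PySem.List.pyRange 0 C 1).filterMap (fun c =>
              if bandIndex bandsC c = some j then some (cellAt grid r c) else none) else []) :=
      funext hinner
    rw [hfun, flatMap_dite_eq_filter_flatMap]
    have hRfilter : (PySem.List.pyRange 0 R 1).filter (fun r => decide (bandIndex bandsR r = some i))
        = PySem.List.pyRange (bandsR[i]!).1 (bandsR[i]!).2 1 := by
      rw [List.filter_congr (q := fun r => decide ((bandsR[i]!).1 ≤ r) && decide (r < (bandsR[i]!).2))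
        (fun r _ => by simp only [← Bool.decide_and]; exact decide_eq_decide.mpr (hRiff r))]
      exact filter_pyRange_band R _ _ (hbR _ hRmem).1 (hbR _ hRmem).2.1 (hbR _ hRmem).2.2
    have hCfilter : (PySem.List.pyRange 0 C 1).filter (fun c => decide (bandIndex bandsC c = some j))
        = PySem.List.pyRange (bandsC[j]!).1 (bandsC[j]!).2 1 := by
      rw [List.filter_congr (q := fun c => decide ((bandsC[j]!).1 ≤ c) && decide (c < (bandsC[j]!).2))
        (fun c _ => by simp only [← Bool.decide_and]; exact decide_eq_decide.mpr (hCiff c))]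
      exact filter_pyRange_band C _ _ (hbC _ hCmem).1 (hbC _ hCmem).2.1 (hbC _ hCmem).2.2
    rw [hRfilter]
    apply List.flatMap_congr
    intro r _
    rw [filterMap_dite_eq_map_filter (PySem.List.pyRange 0 C 1) (fun c => bandIndex bandsC c = some j) (fun c => cellAt grid r c), hCfilter]
  apply List.ext_getElem?
  intro n
  rw [List.getElem?_map, List.getElem?_map]
  obtain ⟨hlen, hrows⟩ := shape_foldl
    ((PySem.List.pyRange 0 R 1).flatMap (fun r => (PySem.List.pyRange 0 C 1).map (fun c => (r, c))))
    (bandIndex bandsR) (bandIndex bandsC) (cellAt grid)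
    (bandsR.map (fun _ => bandsC.map (fun _ => (PySem.Dict.empty : PySem.Dict Int Int))))
  by_cases hn : n < bandsR.length
  · have hRn : bandsR[n]? = some bandsR[n] := List.getElem?_eq_getElem hn
    have hbang : bandsR[n]! = bandsR[n] := by
      simp [List.getElem!_eq_getElem?_getD, hRn]
    set L := ((PySem.List.pyRange 0 R 1).flatMap (fun r => (PySem.List.pyRange 0 C 1).map (fun c => (r, c)))) with hL
    set F := (fun (st : List (List (PySem.Dict Int Int))) (p : Int × Int) =>
          match bandIndex bandsR p.1, bandIndex bandsC p.2 with
          | some a, some b => upd2 st a b (cellAt grid p.1 p.2)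
          | _, _ => st) with hF
    set init := (bandsR.map (fun _ => bandsC.map (fun _ => (PySem.Dict.empty : PySem.Dict Int Int)))) with hinit
    have hinitn : init[n]? = some (bandsC.map (fun _ => (PySem.Dict.empty : PySem.Dict Int Int))) := by
      rw [hinit, List.getElem?_map, hRn]; simp
    have hlen' : n < (L.foldl F init).length := by
      rw [hlen, hinit, List.length_map]; exact hn
    have hCn : (L.foldl F init)[n]? = some ((L.foldl F init)[n]'hlen') := List.getElem?_eq_getElem hlen'
    rw [hRn, hCn]
    simp only [Option.map_some, Option.some.injEq]
    have hrowlen : ((L.foldl F init)[n]'hlen').length = bandsC.length := by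
      have := hrows n
      rw [hCn, hinitn] at this
      simpa using this
    apply List.ext_getElem?
    intro m
    rw [List.getElem?_map, List.getElem?_map]
    by_cases hm : m < bandsC.length
    · have hCm : bandsC[m]? = some bandsC[m] := List.getElem?_eq_getElem hm
      have hbangC : bandsC[m]! = bandsC[m] := by
        simp [List.getElem!_eq_getElem?_getD, hCm]
      have hget2init : get2 init n m = some PySem.Dict.empty := by
        unfold get2
        rw [hinitn]
        simp [hm]
      have hget2 : get2 (L.foldl F init) n m
          = some ((L.filterMap (fun p =>
              match bandIndex bandsR p.1, bandIndex bandsC p.2 with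
              | some a, some b => if a = n ∧ b = m then some (cellAt grid p.1 p.2) else none
              | _, _ => none)).foldl (fun d v => d.modify v 0 (· + 1)) PySem.Dict.empty) := by
        rw [hF, get2_foldl L (bandIndex bandsR) (bandIndex bandsC) (cellAt grid) init n m, hget2init]
        rfl
      have hentry : ((L.foldl F init)[n]'hlen')[m]?
          = some (PySem.Dict.counter
              ((PySem.List.pyRange (bandsR[n]).1 (bandsR[n]).2 1).flatMap (fun r =>
                (PySem.List.pyRange (bandsC[m]).1 (bandsC[m]).2 1).map (fun c => cellAt grid r c)))) := by
        have : get2 (L.foldl F init) n m = ((L.foldl F init)[n]'hlen')[m]? := by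
          unfold get2; rw [hCn]; rfl
        rw [← this, hget2]
        congr 1
        rw [PySem.Dict.counter_eq_foldl]
        congr 1
        have := hfilt n m hn hm
        rw [hbang, hbangC] at this
        exact this
      rw [hCm, hentry]
      rfl
    · have h1 : bandsC[m]? = none := List.getElem?_eq_none (by omega)
      have h2 : ((L.foldl F init)[n]'hlen')[m]? = none := List.getElem?_eq_none (by omega)
      rw [h1, h2]; rfl
  · have h1 : bandsR[n]? = none := List.getElem?_eq_none (by omega)
    have h2 : (((PySem.List.pyRange 0 R 1).flatMap (fun r => (PySem.List.pyRange 0 C 1).map (fun c => (r, c)))).foldl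
        (fun (st : List (List (PySem.Dict Int Int))) (p : Int × Int) =>
          match bandIndex bandsR p.1, bandIndex bandsC p.2 with
          | some a, some b => upd2 st a b (cellAt grid p.1 p.2)
          | _, _ => st)
        (bandsR.map (fun _ => bandsC.map (fun _ => (PySem.Dict.empty : PySem.Dict Int Int)))))[n]? = none := by
      apply List.getElem?_eq_none
      rw [hlen, List.length_map]; omega
    rw [h1, h2]; rfl

theorem cnt_eq (grid : List (List Int)) :
    grid.foldl (fun d row => row.foldl (fun d v => d.modify v 0 (· + 1)) d)
        (PySem.Dict.empty : PySem.Dict Int Int)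
      = PySem.Dict.counter (grid.flatMap (fun row => row)) := by
  rw [PySem.Dict.counter_eq_foldl]
  have h : grid.flatMap (fun row => row) = grid.flatten := by simp
  rw [h, List.foldl_flatten]

theorem pyRange_pairwise (n : Int) : (PySem.List.pyRange 0 n 1).Pairwise (· < ·) := by
  rw [PySem.List.pyRange_of_pos 0 n (by norm_num)]
  exact List.pairwise_lt_range.map _ (fun a b h => by omega)

theorem filter_pyRange_mem (n : Int) (q : Int → Bool) :
    ∀ x ∈ (PySem.List.pyRange 0 n 1).filter q, 0 ≤ x ∧ x < n := by
  intro x hx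
  have := PySem.List.mem_pyRange_one.mp (List.mem_of_mem_filter hx)
  omega

theorem sep_pairwise (n : Int) (hn : 0 ≤ n) (q : Int → Bool) :
    (([-1] ++ (PySem.List.pyRange 0 n 1).filter q ++ [n]) : List Int).Pairwise (· < ·) := by
  have hu : ((PySem.List.pyRange 0 n 1).filter q).Pairwise (· < ·) :=
    (pyRange_pairwise n).filter q
  have hmem := filter_pyRange_mem n q
  simp only [List.cons_append, List.nil_append, List.pairwise_cons]
  constructor
  · intro b hb
    rcases List.mem_append.mp hb with h | h
    · have := hmem b h; omega
    · simp at h; subst h; omega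
  · rw [List.pairwise_append]
    refine ⟨hu, by simp, ?_⟩
    intro a ha b hb
    simp at hb; subst hb
    exact (hmem a ha).2

theorem bands_props (n : Int) (hn : 0 ≤ n) (q : Int → Bool) :
    (bandsOf ([-1] ++ (PySem.List.pyRange 0 n 1).filter q ++ [n])).Pairwise (fun p q => p.2 ≤ q.1) ∧
    ∀ p ∈ bandsOf ([-1] ++ (PySem.List.pyRange 0 n 1).filter q ++ [n]),
      0 ≤ p.1 ∧ p.1 ≤ p.2 ∧ p.2 ≤ n := by
  have hpw := sep_pairwise n hn q
  refine ⟨bandsOf_pairwise _ hpw, ?_⟩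
  intro p hp
  obtain ⟨h1, h2, h3, _⟩ := bandsOf_mem _ hpw p hp
  have hhead : ([-1] ++ (PySem.List.pyRange 0 n 1).filter q ++ [n] : List Int).head? = some (-1) := rfl
  have hlow := h2 (-1) hhead
  have hup : p.2 ≤ n := by
    simp only [List.cons_append, List.nil_append, List.mem_cons, List.mem_append] at h3
    rcases h3 with h | h | h
    · omega
    · exact le_of_lt (filter_pyRange_mem n q _ h).2
    · simp at h; omega
  exact ⟨by omega, by omega, hup⟩

-- ===== lemmas for B's runs / enumerate pass =====

def runsRec (i : Int) (st : Option Int) : List Bool → List (Int × Int)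
  | [] => match st with | some s => [(s, i)] | none => []
  | b :: t =>
    if b then
      match st with
      | some s => (s, i) :: runsRec (i+1) none t
      | none => runsRec (i+1) none t
    else
      match st with
      | none => runsRec (i+1) (some i) t
      | some s => runsRec (i+1) (some s) t

theorem runs_go (seps : List Bool) : ∀ (i : Int) (bands : List (Int × Int)) (st : Option Int),
    (match ((PySem.List.enumerate seps i).foldl
      (fun (acc : List (Int × Int) × Option Int) p =>
        if p.2 then
          match acc.2 with
          | some s => (acc.1 ++ [(s, p.1)], none)
          | none => acc
        else
          match acc.2 with
          | none => (acc.1, some p.1)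
          | some _ => acc) (bands, st)) with
     | (bs, some s) => bs ++ [(s, i + (seps.length : Int))]
     | (bs, none) => bs) = bands ++ runsRec i st seps := by
  induction seps with
  | nil => intro i bands st; cases st <;> simp [PySem.List.enumerate_nil, runsRec]
  | cons b t ih =>
    intro i bands st
    rw [PySem.List.enumerate_cons, List.foldl_cons]
    have harith : i + ((b :: t).length : Int) = (i + 1) + (t.length : Int) := by
      simp [List.length_cons]; omega
    cases b with
    | true =>
      cases st with
      | some s =>
        rw [harith]
        have h := ih (i + 1) (bands ++ [(s, i)]) none
        simp only [runsRec, if_pos]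
        simpa [List.append_assoc] using h
      | none =>
        rw [harith]
        have h := ih (i + 1) bands none
        simp only [runsRec, if_pos]
        simpa using h
    | false =>
      cases st with
      | some s =>
        rw [harith]
        have h := ih (i + 1) bands (some s)
        simp only [runsRec]
        simpa using h
      | none =>
        rw [harith]
        have h := ih (i + 1) bands (some i)
        simp only [runsRec]
        simpa using h

theorem runs_eq_runsRec (seps : List Bool) : runs seps = runsRec 0 none seps := by
  have h := runs_go seps 0 [] none
  simp only [zero_add, List.nil_append] at h
  unfold runs
  rw [← h]
  rcases hfold : ((PySem.List.enumerate seps 0).foldl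
      (fun (acc : List (Int × Int) × Option Int) p =>
        if p.2 then
          match acc.2 with
          | some s => (acc.1 ++ [(s, p.1)], none)
          | none => acc
        else
          match acc.2 with
          | none => (acc.1, some p.1)
          | some _ => acc) ([], none)) with ⟨bs, st2⟩
  simp only [hfold]
  cases st2 <;> rfl

theorem runsRec_cons_true_none (i : Int) (t : List Bool) :
    runsRec i none (true :: t) = runsRec (i+1) none t := rfl
theorem runsRec_cons_true_some (i s : Int) (t : List Bool) :
    runsRec i (some s) (true :: t) = (s, i) :: runsRec (i+1) none t := rfl
theorem runsRec_cons_false_none (i : Int) (t : List Bool) :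
    runsRec i none (false :: t) = runsRec (i+1) (some i) t := rfl
theorem runsRec_cons_false_some (i s : Int) (t : List Bool) :
    runsRec i (some s) (false :: t) = runsRec (i+1) (some s) t := rfl

theorem bandsOf_cons_cons (a b : Int) (t : List Int) :
    bandsOf (a :: b :: t) = (if b > a + 1 then [(a + 1, b)] else []) ++ bandsOf (b :: t) := rfl

theorem runsRec_bands (n : Nat) : ∀ (i : Int) (q : Int → Bool) (st : Option Int),
    (∀ s, st = some s → s < i) →
    runsRec i st ((PySem.List.pyRange i (i + (n : Int)) 1).map q)
      = bandsOf ((st.elim (i - 1) (fun s => s - 1))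
          :: ((PySem.List.pyRange i (i + (n : Int)) 1).filter q ++ [i + (n : Int)])) := by
  induction n with
  | zero =>
    intro i q st hst
    rw [show (i + ((0 : Nat) : Int)) = i by simp, PySem.List.pyRange_one_eq_nil (le_refl i)]
    cases st with
    | none => simp [runsRec, bandsOf, Option.elim]
    | some s =>
      have hs : s < i := hst s rfl
      simp [runsRec, bandsOf, Option.elim]
      omega
  | succ m ih =>
    intro i q st hst
    have hend : i + ((m + 1 : Nat) : Int) = (i + 1) + (m : Int) := by push_cast; omega
    rw [hend, PySem.List.pyRange_one_cons (by omega : i < (i + 1) + (m : Int)),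
        List.map_cons, List.filter_cons]
    have hii : i + 1 - 1 = i := by omega
    cases hq : q i with
    | true =>
      cases st with
      | none =>
        simp only [Option.elim_none]
        rw [runsRec_cons_true_none, ih (i + 1) q none (by simp)]
        simp only [Option.elim_none, hii, if_true, List.cons_append]
        rw [bandsOf_cons_cons (i - 1) i, if_neg (by omega : ¬ (i > (i - 1) + 1))]
        simp
      | some s =>
        have hs : s < i := hst s rfl
        simp only [Option.elim_some]
        rw [runsRec_cons_true_some, ih (i + 1) q none (by simp)]
        simp only [Option.elim_none, hii, if_true, List.cons_append]
        rw [bandsOf_cons_cons (s - 1) i, if_pos (by omega : i > (s - 1) + 1)]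
        rw [show s - 1 + 1 = s by omega]
        simp
    | false =>
      cases st with
      | none =>
        simp only [Option.elim_none]
        rw [runsRec_cons_false_none, ih (i + 1) q (some i) (by intro s hs; cases hs; omega)]
        simp only [Option.elim_some, hii, if_false, Bool.false_eq_true]
      | some s =>
        have hs : s < i := hst s rfl
        simp only [Option.elim_some]
        rw [runsRec_cons_false_some, ih (i + 1) q (some s) (by intro s' hs'; cases hs'; omega)]
        simp only [Option.elim_some, if_false, Bool.false_eq_true]

theorem runs_filter (n : Nat) (q : Int → Bool) :
    runs ((PySem.List.pyRange 0 (n : Int) 1).map q)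
      = bandsOf ([-1] ++ (PySem.List.pyRange 0 (n : Int) 1).filter q ++ [(n : Int)]) := by
  rw [runs_eq_runsRec]
  have h := runsRec_bands n 0 q none (by simp)
  simp only [zero_add] at h
  rw [h]
  norm_num

theorem all_eq_all_pyRange {α : Type} (xs : List α) (d : α) (g : α → Bool) :
    xs.all g = (PySem.List.pyRange 0 (xs.length : Int) 1).all (fun j => g (PySem.List.pyGetD xs j d)) := by
  conv_lhs => rw [← PySem.List.map_pyGetD_pyRange_zero (xs := xs) (d := d)]
  rw [List.all_map]
  rfl

theorem bandIndex_none_of_le (bands : List (Int × Int)) (c B : Int)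
    (h : ∀ p ∈ bands, p.2 ≤ B) (hc : B ≤ c) : bandIndex bands c = none := by
  unfold bandIndex
  rw [List.findIdx?_eq_none_iff]
  intro p hp
  have := h p hp
  simp only [Bool.and_eq_false_iff, decide_eq_false_iff_not, not_lt]
  right; omega

theorem all_congr_mem {α : Type} (l : List α) (p q : α → Bool) (h : ∀ x ∈ l, p x = q x) :
    l.all p = l.all q := by
  induction l with
  | nil => rfl
  | cons a t ih => simp only [List.all_cons, h a (by simp), ih (fun x hx => h x (by simp [hx]))]

theorem map_eq_map_pyRange {α β : Type} (xs : List α) (g : Int → β) (f : α → β)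
    (h : ∀ (k : Nat) (hk : k < xs.length), f xs[k] = g k) :
    xs.map f = (PySem.List.pyRange 0 (xs.length : Int) 1).map g := by
  apply List.ext_getElem?
  intro k
  by_cases hk : k < xs.length
  · rw [List.getElem?_map, List.getElem?_eq_getElem hk,
        PySem.List.getElem?_map_pyRange_zero g xs.length k hk]
    simp [h k hk]
  · rw [List.getElem?_map, List.getElem?_eq_none (by omega)]
    rw [List.getElem?_eq_none (by
      rw [List.length_map, PySem.List.length_pyRange_one]; omega)]
    rfl

-- B's per-row slice-based separator flags = A's range(C) scans, under Pre (rows ≥ C long)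
theorem rowSep_eq (grid : List (List Int)) (bg : Int)
    (hrows : ∀ row ∈ grid, (grid.headD []).length ≤ row.length) :
    grid.map (fun row =>
        (PySem.List.slice row none (some ((grid.headD []).length : Int))).all (fun v => v == bg))
      = (PySem.List.pyRange 0 (grid.length : Int) 1).map (fun r =>
          (PySem.List.pyRange 0 ((grid.headD []).length : Int) 1).all (fun c => cellAt grid r c == bg)) := by
  apply map_eq_map_pyRange
  intro k hk
  have hlen : (grid.headD []).length ≤ grid[k].length := hrows _ (List.getElem_mem hk)
  rw [PySem.List.slice_to_natCast]
  have htake : (grid[k].take (grid.headD []).length).length = (grid.headD []).length :=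
    List.length_take_of_le hlen
  rw [all_eq_all_pyRange (grid[k].take (grid.headD []).length) 0 (fun v => v == bg), htake]
  apply all_congr_mem
  intro c hc
  have hcC := PySem.List.mem_pyRange_one.mp hc
  rw [PySem.List.pyGetD_eq_getElem (grid[k].take (grid.headD []).length) 0 hcC.1
      (by rw [htake]; exact_mod_cast hcC.2)]
  show ((grid[k].take (grid.headD []).length)[c.toNat]'(by omega) == bg)
      = (cellAt grid (k : Int) c == bg)
  rw [List.getElem_take]
  unfold cellAt
  rw [PySem.List.pyGetD_natCast grid k [], List.getD_eq_getElem?_getD,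
      List.getElem?_eq_getElem hk]
  simp only [Option.getD_some]
  rw [PySem.List.pyGetD_eq_getElem grid[k] 0 hcC.1 (by omega)]

-- B's per-column whole-grid 'all' = A's range(R) scans
theorem colSep_eq (grid : List (List Int)) (bg : Int) (c : Int) :
    grid.all (fun row => PySem.List.pyGetD row c 0 == bg)
      = (PySem.List.pyRange 0 (grid.length : Int) 1).all (fun r => cellAt grid r c == bg) := by
  rw [all_eq_all_pyRange grid ([] : List Int) (fun row => PySem.List.pyGetD row c 0 == bg)]
  rfl

-- B's enumerate pass = the range pass over (R, C) with cellAt, under Pre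
theorem pass_eq (grid : List (List Int)) (bR bC : List (Int × Int))
    (init : List (List (PySem.Dict Int Int)))
    (hrows : ∀ row ∈ grid, (grid.headD []).length ≤ row.length)
    (hbC : ∀ p ∈ bC, p.2 ≤ ((grid.headD []).length : Int)) :
    (PySem.List.enumerate grid 0).foldl (fun st p =>
      match bandIndex bR p.1 with
      | none => st
      | some i => (PySem.List.enumerate p.2 0).foldl (fun st q =>
          match bandIndex bC q.1 with
          | none => st
          | some j => st.modify i (fun rowL =>
              rowL.modify j (fun d => d.modify q.2 0 (· + 1)))) st) init
    = (PySem.List.pyRange 0 (grid.length : Int) 1).foldl (fun st r =>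
      match bandIndex bR r with
      | none => st
      | some i => (PySem.List.pyRange 0 ((grid.headD []).length : Int) 1).foldl (fun st c =>
          match bandIndex bC c with
          | none => st
          | some j => upd2 st i j (cellAt grid r c)) st) init := by
  rw [PySem.List.enumerate_eq_map_pyRange (d := ([] : List Int)), List.foldl_map]
  simp only [PySem.List.len_eq]
  apply PySem.List.foldl_congr_mem
  intro st r hr
  have hrR := PySem.List.mem_pyRange_one.mp hr
  cases hb : bandIndex bR r with
  | none => rfl
  | some i =>
    show (PySem.List.enumerate (PySem.List.pyGetD grid r []) 0).foldl (fun st q =>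
          match bandIndex bC q.1 with
          | none => st
          | some j => st.modify i (fun rowL =>
              rowL.modify j (fun d => d.modify q.2 0 (· + 1)))) st
        = (PySem.List.pyRange 0 ((grid.headD []).length : Int) 1).foldl (fun st c =>
          match bandIndex bC c with
          | none => st
          | some j => upd2 st i j (cellAt grid r c)) st
    set row := PySem.List.pyGetD grid r [] with hrowdef
    have hrow_mem : row ∈ grid := by
      rw [hrowdef, PySem.List.pyGetD_eq_getElem grid [] hrR.1 (by simpa using hrR.2)]
      exact List.getElem_mem _
    have hlen : (grid.headD []).length ≤ row.length := hrows _ hrow_mem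
    rw [PySem.List.enumerate_eq_map_pyRange (d := (0 : Int)), List.foldl_map]
    simp only [PySem.List.len_eq]
    rw [PySem.List.pyRange_one_append 0 ((grid.headD []).length : Int) (row.length : Int)
        (by positivity) (by exact_mod_cast hlen)]
    rw [List.foldl_append]
    have htail : ∀ st0 : List (List (PySem.Dict Int Int)),
        (PySem.List.pyRange ((grid.headD []).length : Int) (row.length : Int) 1).foldl
        (fun (st : List (List (PySem.Dict Int Int))) (c : Int) =>
          match bandIndex bC c with
          | none => st
          | some j => st.modify i (fun rowL =>
              rowL.modify j (fun d => d.modify (PySem.List.pyGetD row c 0) 0 (· + 1)))) st0 = st0 := by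
      intro st0
      rw [PySem.List.foldl_congr_mem (g := fun st _ => st)]
      · exact PySem.List.foldl_ignore _ _
      · intro acc c hc
        have hcm := PySem.List.mem_pyRange_one.mp hc
        rw [bandIndex_none_of_le bC c ((grid.headD []).length : Int) hbC hcm.1]
    rw [htail]
    apply PySem.List.foldl_congr_mem
    intro acc c hc
    cases hbc : bandIndex bC c <;> rfl

-- ===== VERDICT =====
theorem transform_spec : Claim_equal_transform := by
  unfold Claim_equal_transform
  intro grid _ hpre
  obtain ⟨hne, hflat, hrows⟩ := hpre
  unfold Spec_transform
  simp only [transform, transform_alt, cnt_eq]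
  generalize mostCommon1 (PySem.Dict.counter (List.flatMap (fun row => row) grid)) = bg
  rw [bands_eq_bandsOf, bands_eq_bandsOf]
  rw [rowSep_eq grid bg hrows]
  rw [show ((PySem.List.pyRange 0 ((grid.headD []).length : Int) 1).map (fun c =>
      grid.all (fun row => PySem.List.pyGetD row c 0 == bg)))
    = ((PySem.List.pyRange 0 ((grid.headD []).length : Int) 1).map (fun c =>
      (PySem.List.pyRange 0 (grid.length : Int) 1).all (fun r => cellAt grid r c == bg)))
    from List.map_congr_left (fun c _ => colSep_eq grid bg c)]
  rw [runs_filter grid.length, runs_filter (grid.headD []).length]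
  have hC := bands_props ((grid.headD []).length : Int) (Int.natCast_nonneg _)
      (fun c => (PySem.List.pyRange 0 (grid.length : Int) 1).all fun r => cellAt grid r c == bg)
  have hR := bands_props ((grid.length : Int)) (Int.natCast_nonneg _)
      (fun r => (PySem.List.pyRange 0 ((grid.headD []).length : Int) 1).all fun c => cellAt grid r c == bg)
  rw [pass_eq grid _ _ _ hrows (fun p hp => (hC.2 p hp).2.2)]
  exact core grid _ _ _ _ hR.1 hC.1 hR.2 hC.2
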